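-- pv_equiv track=rewrite | github.com/kylebebak/py-geohash-any | geohash.py | _nbr_prev
-- ===== SOURCE A (Python) =====
-- def _nbr_prev(geohash):
--     """Helper function for computing N/W neighbors."""
--     GH = list(geohash)
--     for i in range(len(GH)-1, -1, -1):
--         if GH[i] == '0':
--             GH[i] = '1'
--         else:
--             GH[i] = '0'
--             break
--     return GH
-- ===== SOURCE B (Python) =====
-- def _nbr_prev(geohash):
--     """Compute the previous binary neighbor by locating the borrow point
--     with rstrip and assembling the pieces, instead of a right-to-left
--     mutation loop."""
--     stripped = geohash.rstrip('0')
--     trailing = len(geohash) - len(stripped)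
--     if not stripped:
--         return ['1'] * len(geohash)
--     return list(stripped[:-1]) + ['0'] + ['1'] * trailing
-- ===== Notes on version B (the rewrite author's own statement) =====
-- stated objective: simpler
-- what changed: Replaces the right-to-left mutation loop with break by an rstrip('0') that finds the borrow point once, then assembles prefix + '0' + trailing '1's (all-zeros/empty handled by the empty-stripped case).
import Mathlib
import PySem

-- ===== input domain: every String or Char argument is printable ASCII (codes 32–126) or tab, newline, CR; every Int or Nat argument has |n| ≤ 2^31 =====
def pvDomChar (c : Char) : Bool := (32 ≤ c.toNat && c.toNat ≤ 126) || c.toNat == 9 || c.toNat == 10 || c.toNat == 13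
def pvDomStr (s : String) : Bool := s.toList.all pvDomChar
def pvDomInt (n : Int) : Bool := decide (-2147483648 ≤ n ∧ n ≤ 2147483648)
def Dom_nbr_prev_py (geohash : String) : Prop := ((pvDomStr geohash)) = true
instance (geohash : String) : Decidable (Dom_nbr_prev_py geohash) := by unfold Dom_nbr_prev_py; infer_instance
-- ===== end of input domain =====

-- B replaces A's right-to-left mutation loop (with break) by one rstrip('0') locating the
-- borrow point, then assembles prefix + "0" + trailing "1"s; objective: simpler decomposition.

-- ===== PORT A =====
-- the loop body: for i in range(len(GH)-1, -1, -1): if GH[i]=='0': GH[i]='1' else: GH[i]='0'; break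
def nbrPrevLoop (GH : List String) (idxs : List Int) : List String :=
  match idxs with
  | [] => GH
  | i :: rest =>
      if PySem.List.pyGetD GH i "" == "0" then
        nbrPrevLoop (PySem.List.pySetD GH i "1") rest
      else
        PySem.List.pySetD GH i "0"          -- break

def nbr_prev_py (geohash : String) : List String :=
  let GH := geohash.toList.map (fun c => String.ofList [c])   -- GH = list(geohash)
  nbrPrevLoop GH (PySem.List.pyRange ((GH.length : Int) - 1) (-1) (-1))

-- ===== PORT B =====
-- rstrip('0') ported by hand (exact): drop '0's from the right end
def bRstrip0 (cs : List Char) : List Char :=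
  (cs.reverse.dropWhile (· == '0')).reverse

def nbr_prev_py_alt (geohash : String) : List String :=
  let L := geohash.toList
  let stripped := bRstrip0 L
  if stripped.isEmpty then
    List.replicate L.length "1"
  else
    (PySem.List.slice stripped none (some (-1))).map (fun c => String.ofList [c])
      ++ ["0"] ++ List.replicate (L.length - stripped.length) "1"

-- ===== PRECONDITION & SPEC =====
def Spec_nbr_prev_py (geohash : String) (out : List String) : Prop := out = nbr_prev_py_alt geohash
instance (geohash : String) (out : List String) : Decidable (Spec_nbr_prev_py geohash out) := by unfold Spec_nbr_prev_py; infer_instance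

-- ===== CLAIM (what is proved, stated in full; the proofs are below) =====
def Claim_equal_nbr_prev_py : Prop := ∀ (geohash : String), Dom_nbr_prev_py geohash → Spec_nbr_prev_py geohash (nbr_prev_py geohash)

-- ===== LEMMAS AND PROOFS =====

-- reference function on the REVERSED char list: flip '0's to '1' until the first non-'0', set it to '0'
def goRev (r : List Char) : List Char :=
  match r with
  | [] => []
  | c :: cs => if c == '0' then '1' :: goRev cs else '0' :: cs

theorem goRev_spec (r : List Char) :
    goRev r = (r.takeWhile (· == '0')).map (fun _ => '1') ++
      (match r.dropWhile (· == '0') with | [] => [] | _ :: ds => '0' :: ds) := by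
  induction r with
  | nil => simp [goRev]
  | cons c cs ih =>
      by_cases h : c = '0'
      · subst h; simp [goRev, ih]
      · have hb : (c == '0') = false := by simp [h]
        simp [goRev, hb]

-- the loop leaves an appended last element alone when all indices are inside the prefix
theorem nbrPrevLoop_append (idxs : List Int) (X : List String) (y : String)
    (h : ∀ i ∈ idxs, 0 ≤ i ∧ i < (X.length : Int)) :
    nbrPrevLoop (X ++ [y]) idxs = nbrPrevLoop X idxs ++ [y] := by
  induction idxs generalizing X with
  | nil => simp [nbrPrevLoop]
  | cons i rest ih =>
      obtain ⟨h0, hlt⟩ := h i (by simp)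
      have hnat : i.toNat < X.length := by omega
      have hget : PySem.List.pyGetD (X ++ [y]) i "" = PySem.List.pyGetD X i "" := by
        rw [PySem.List.pyGetD_of_nonneg _ _ h0, PySem.List.pyGetD_of_nonneg _ _ h0]
        rw [List.getD_eq_getElem?_getD, List.getD_eq_getElem?_getD,
          List.getElem?_append_left hnat]
      have hset : ∀ v, PySem.List.pySetD (X ++ [y]) i v = PySem.List.pySetD X i v ++ [y] := by
        intro v
        rw [PySem.List.pySetD_of_nonneg _ _ h0, PySem.List.pySetD_of_nonneg _ _ h0,
          List.set_append_left _ _ hnat]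
      simp only [nbrPrevLoop, hget, hset]
      split
      · rw [ih]
        intro j hj
        have := h j (by simp [hj])
        simpa [PySem.List.pySetD_of_nonneg _ _ h0] using this
      · rfl

-- A's loop, run on the reversed-and-re-reversed list, computes goRev
theorem loop_eq_goRev (r : List Char) :
    nbrPrevLoop (r.reverse.map (fun c => String.ofList [c]))
        (PySem.List.pyRange ((r.length : Int) - 1) (-1) (-1)) =
      ((goRev r).reverse).map (fun c => String.ofList [c]) := by
  induction r with
  | nil => simp [PySem.List.pyRange_neg_one_eq_nil, nbrPrevLoop, goRev]
  | cons c cs ih =>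
      have hlen : ((c :: cs).length : Int) - 1 = (cs.length : Int) := by simp
      have hcons : PySem.List.pyRange ((c :: cs).length - 1 : Int) (-1) (-1)
          = (cs.length : Int) :: PySem.List.pyRange ((cs.length : Int) - 1) (-1) (-1) := by
        rw [hlen, PySem.List.pyRange_neg_one_cons (by omega)]
      have hX : (c :: cs).reverse.map (fun c => String.ofList [c])
          = cs.reverse.map (fun c => String.ofList [c]) ++ [String.ofList [c]] := by simp
      have hXlen : (cs.reverse.map (fun c => String.ofList [c])).length = cs.length := by simp
      have hget : PySem.List.pyGetD ((c :: cs).reverse.map (fun c => String.ofList [c]))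
          (cs.length : Int) "" = String.ofList [c] := by
        rw [hX, PySem.List.pyGetD_of_nonneg _ _ (by omega)]
        simp [List.getD_eq_getElem?_getD]
      have hset : ∀ v, PySem.List.pySetD ((c :: cs).reverse.map (fun c => String.ofList [c]))
          (cs.length : Int) v = cs.reverse.map (fun c => String.ofList [c]) ++ [v] := by
        intro v
        rw [hX, PySem.List.pySetD_of_nonneg _ _ (by omega)]
        have : ((cs.length : Int)).toNat = (cs.reverse.map (fun c => String.ofList [c])).length := by
          simp
        rw [this, List.set_append_right _ _ (le_refl _)]
        simp
      rw [hcons]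
      simp only [nbrPrevLoop, hget, hset]
      by_cases h : c = '0'
      · subst h
        simp only [beq_self_eq_true, if_true]
        rw [nbrPrevLoop_append _ _ _ ?_]
        · rw [ih]
          simp [goRev]
        · intro i hi
          rw [PySem.List.mem_pyRange_neg_one] at hi
          constructor <;> [omega; (rw [hXlen]; omega)]
      · have hb : (String.ofList [c] == "0") = false := by
          rw [beq_eq_false_iff_ne]
          intro hx
          have h2 := congrArg String.toList hx
          simp at h2
          exact h h2
        simp only [hb, Bool.false_eq_true, if_false]
        simp [goRev, h]

-- B computes goRev too
theorem alt_eq_goRev (g : String) :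
    nbr_prev_py_alt g = ((goRev g.toList.reverse).reverse).map (fun c => String.ofList [c]) := by
  unfold nbr_prev_py_alt bRstrip0
  generalize g.toList = L
  dsimp only
  rw [goRev_spec, PySem.List.slice_to_neg_one]
  cases hds : L.reverse.dropWhile (· == '0') with
  | nil =>
      have hall : ∀ c ∈ L.reverse, c = '0' := by
        intro c hc
        simpa using List.dropWhile_eq_nil_iff.mp hds c hc
      have htw : L.reverse.takeWhile (· == '0') = L.reverse :=
        List.takeWhile_eq_self_iff.mpr (by intro c hc; simp [hall c hc])
      simp [htw, List.map_replicate]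
  | cons d ds =>
      have hrlen : L.length
          = (L.reverse.takeWhile (· == '0')).length + (ds.length + 1) := by
        have := congrArg List.length (List.takeWhile_append_dropWhile
          (p := (· == '0')) (l := L.reverse))
        rw [hds] at this
        simp only [List.length_append, List.length_cons, List.length_reverse] at this
        omega
      have hne : ((d :: ds).reverse).isEmpty = false := by simp
      have hdl : ((d :: ds).reverse).dropLast = ds.reverse := by simp
      have hlen2 : L.length - ((d :: ds).reverse).length
          = (L.reverse.takeWhile (· == '0')).length := by
        simp only [List.length_reverse, List.length_cons]
        omega
      have hrep : ((L.reverse.takeWhile (· == '0')).map (fun _ => '1')).reverse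
          = List.replicate (L.reverse.takeWhile (· == '0')).length '1' := by
        rw [List.reverse_eq_iff]
        simp
      simp [List.map_replicate]
      omega

-- ===== VERDICT (by name: the statement is the Claim_ definition above) =====
theorem nbr_prev_py_spec : Claim_equal_nbr_prev_py := by
  intro g _
  unfold Spec_nbr_prev_py
  rw [alt_eq_goRev]
  unfold nbr_prev_py
  have := loop_eq_goRev g.toList.reverse
  simpa using this
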